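-- pv_equiv track=rewrite | github.com/yesjiyoung/OSS_NL2SQL_Shopping_Cart_Speaker | model/sql_translation/select.py | se_find_origin_value
-- ===== SOURCE A (Python) =====
-- def se_find_origin_value (any_list):
--     re = 'NAN'
--     country = ['korea', 'austrailia', 'america', 'california', 'vietnam', 'mexico', 'chile', 'us']
--     for i in range(0, len(any_list)):
--         for j in range(0, len(country)):
--             if(any_list[i] == country[j]):
--                 re = country[j]
--                 break
--
--     if(re == 'us'):
--         re = 'america'
--
--     return re
-- ===== SOURCE B (Python) =====
-- COUNTRY = ['korea', 'austrailia', 'america', 'california', 'vietnam', 'mexico', 'chile', 'us']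
--
-- def se_find_origin_value(any_list):
--     re = 'NAN'
--     for x in reversed(any_list):
--         if x in COUNTRY:
--             re = x
--             break
--     if re == 'us':
--         re = 'america'
--     return re
-- ===== Notes on version B (the rewrite author's own statement) =====
-- stated objective: simpler
-- what changed: Replaces the forward overwrite-everything double loop with a single backward scan that stops at the first (i.e. last-in-order) country match.
import Mathlib
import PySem

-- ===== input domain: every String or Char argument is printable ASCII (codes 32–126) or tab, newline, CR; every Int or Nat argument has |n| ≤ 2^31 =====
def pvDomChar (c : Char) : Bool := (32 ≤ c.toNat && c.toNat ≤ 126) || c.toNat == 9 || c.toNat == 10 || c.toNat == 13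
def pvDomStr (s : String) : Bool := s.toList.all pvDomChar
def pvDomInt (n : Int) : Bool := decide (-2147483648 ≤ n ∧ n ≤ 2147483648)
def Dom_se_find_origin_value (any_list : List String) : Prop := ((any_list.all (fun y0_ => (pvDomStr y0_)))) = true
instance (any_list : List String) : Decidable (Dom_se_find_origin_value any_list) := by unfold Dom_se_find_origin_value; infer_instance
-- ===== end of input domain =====

-- B replaces A's forward overwrite-everything double loop by a single backward scan
-- that stops at the first match (objective: simpler); return values are identical.

def pvCountry : List String :=
  ["korea", "austrailia", "america", "california", "vietnam", "mexico", "chile", "us"]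

-- ===== PORT A =====
-- inner loop of A: scan `country` in order, on the first j with x == country[j] return country[j] (break), else keep re
def pvInnerA (x : String) : List String → String → String
  | [], re => re
  | c :: cs, re => if x == c then c else pvInnerA x cs re

def se_find_origin_value (any_list : List String) : String :=
  let re := any_list.foldl (fun re x => pvInnerA x pvCountry re) "NAN"
  if re == "us" then "america" else re

-- ===== PORT B =====
-- B's loop: `for x in reversed(any_list): if x in COUNTRY: re = x; break`
def pvScanB : List String → String
  | [] => "NAN"
  | x :: xs => if pvCountry.contains x then x else pvScanB xs

def se_find_origin_value_alt (any_list : List String) : String :=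
  let re := pvScanB any_list.reverse
  if re == "us" then "america" else re

-- ===== PRECONDITION & SPEC =====
def Spec_se_find_origin_value (any_list : List String) (out : String) : Prop := out = se_find_origin_value_alt any_list
instance (any_list : List String) (out : String) : Decidable (Spec_se_find_origin_value any_list out) := by unfold Spec_se_find_origin_value; infer_instance

-- ===== CLAIM (what is proved, stated in full; the proofs are below) =====
def Claim_equal_se_find_origin_value : Prop := ∀ (any_list : List String), Dom_se_find_origin_value any_list → Spec_se_find_origin_value any_list (se_find_origin_value any_list)

-- ===== LEMMAS AND PROOFS =====

-- A's inner loop returns x itself when x occurs in the scanned list, else re unchanged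
theorem pvInnerA_eq (x : String) (cs : List String) (re : String) :
    pvInnerA x cs re = if cs.contains x then x else re := by
  induction cs with
  | nil => simp [pvInnerA]
  | cons c cs ih =>
    simp only [pvInnerA, List.contains_cons]
    by_cases h : x = c
    · subst h; simp
    · simp [h, ih]

-- aux scan carrying an accumulator; pvScanB l = pvAux l "NAN"
def pvAux : List String → String → String
  | [], re => re
  | x :: xs, re => if pvCountry.contains x then x else pvAux xs re

theorem pvScanB_eq_aux (l : List String) : pvScanB l = pvAux l "NAN" := by
  induction l with
  | nil => rfl
  | cons x xs ih => simp [pvScanB, pvAux, ih]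

-- the forward overwrite fold equals the backward early-exit scan
theorem foldl_eq_aux_reverse (l : List String) (re : String) :
    l.foldl (fun re x => if pvCountry.contains x then x else re) re = pvAux l.reverse re := by
  induction l using List.reverseRecOn generalizing re with
  | nil => rfl
  | append_singleton l a ih =>
    simp only [List.foldl_append, List.foldl_cons, List.foldl_nil, List.reverse_append,
      List.reverse_singleton, List.singleton_append, pvAux]
    split_ifs with h
    · rfl
    · exact ih re

-- ===== VERDICT (by name: the statement is the Claim_ definition above) =====
theorem se_find_origin_value_spec : Claim_equal_se_find_origin_value := by
  intro any_list _
  show se_find_origin_value any_list = se_find_origin_value_alt any_list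
  unfold se_find_origin_value se_find_origin_value_alt
  have hfun : (fun (re x : String) => pvInnerA x pvCountry re)
      = fun re x => if pvCountry.contains x then x else re := by
    funext re x; exact pvInnerA_eq x pvCountry re
  rw [hfun, foldl_eq_aux_reverse, ← pvScanB_eq_aux]
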